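-- pv_equiv track=rewrite | github.com/Shreeaswingit/AI-Bulk-resume-Screener | backend/app/services/matcher.py | _are_skill_variants
-- ===== SOURCE A (Python) =====
-- def _are_skill_variants(skill1: str, skill2: str) -> bool:
--     """Check if two skills are variants of each other"""
--     variants = {
--         'javascript': ['js', 'ecmascript'],
--         'typescript': ['ts'],
--         'python': ['py'],
--         'react': ['reactjs', 'react.js'],
--         'vue': ['vuejs', 'vue.js'],
--         'angular': ['angularjs', 'angular.js'],
--         'node': ['nodejs', 'node.js'],
--         'postgresql': ['postgres', 'psql'],
--         'mongodb': ['mongo'],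
--         'kubernetes': ['k8s'],
--         'aws': ['amazon web services'],
--         'gcp': ['google cloud', 'google cloud platform'],
--         'azure': ['microsoft azure'],
--     }
--
--     for base, alts in variants.items():
--         if (skill1 == base or skill1 in alts) and (skill2 == base or skill2 in alts):
--             return True
--
--     return False
-- ===== SOURCE B (Python) =====
-- def _are_skill_variants(skill1: str, skill2: str) -> bool:
--     """Check if two skills are variants of each other"""
--     variants = {
--         'javascript': ['js', 'ecmascript'],
--         'typescript': ['ts'],
--         'python': ['py'],
--         'react': ['reactjs', 'react.js'],
--         'vue': ['vuejs', 'vue.js'],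
--         'angular': ['angularjs', 'angular.js'],
--         'node': ['nodejs', 'node.js'],
--         'postgresql': ['postgres', 'psql'],
--         'mongodb': ['mongo'],
--         'kubernetes': ['k8s'],
--         'aws': ['amazon web services'],
--         'gcp': ['google cloud', 'google cloud platform'],
--         'azure': ['microsoft azure'],
--     }
--
--     index = {}
--     for base, alts in variants.items():
--         index[base] = base
--         for alt in alts:
--             index[alt] = base
--
--     g1 = index.get(skill1)
--     g2 = index.get(skill2)
--     return g1 is not None and g1 == g2
-- ===== Notes on version B (the rewrite author's own statement) =====
-- stated objective: alternative
-- what changed: Replaces the per-group scan with its compound both-in-this-group test by a reverse index built once (every term mapped to its base), followed by two lookups and one comparison.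
import Mathlib
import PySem

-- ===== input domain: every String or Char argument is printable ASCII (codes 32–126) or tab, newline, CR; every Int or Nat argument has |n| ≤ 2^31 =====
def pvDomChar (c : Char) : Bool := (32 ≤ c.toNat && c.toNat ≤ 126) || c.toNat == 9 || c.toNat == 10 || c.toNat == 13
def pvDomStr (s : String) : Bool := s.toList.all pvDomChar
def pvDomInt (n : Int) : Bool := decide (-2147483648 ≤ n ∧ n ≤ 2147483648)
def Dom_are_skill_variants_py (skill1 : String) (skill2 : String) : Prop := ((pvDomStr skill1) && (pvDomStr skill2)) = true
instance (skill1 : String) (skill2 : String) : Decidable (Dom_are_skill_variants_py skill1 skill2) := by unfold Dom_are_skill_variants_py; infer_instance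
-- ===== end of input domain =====

-- B replaces A's per-group scan with its compound both-in-this-group test by a reverse
-- index term → base built once, then two lookups and one comparison (objective: alternative).

-- the literal variants table shared by both Pythons
def pvTable : List (String × List String) :=
  [("javascript", ["js", "ecmascript"]),
   ("typescript", ["ts"]),
   ("python", ["py"]),
   ("react", ["reactjs", "react.js"]),
   ("vue", ["vuejs", "vue.js"]),
   ("angular", ["angularjs", "angular.js"]),
   ("node", ["nodejs", "node.js"]),
   ("postgresql", ["postgres", "psql"]),
   ("mongodb", ["mongo"]),
   ("kubernetes", ["k8s"]),
   ("aws", ["amazon web services"]),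
   ("gcp", ["google cloud", "google cloud platform"]),
   ("azure", ["microsoft azure"])]

-- ===== PORT A =====
-- A's loop: for base, alts in variants.items(): if (s1 == base or s1 in alts) and (s2 == base or s2 in alts): return True
def pvALoop (s1 s2 : String) : List (String × List String) → Bool
  | [] => false
  | (base, alts) :: rest =>
    if (s1 == base || alts.contains s1) && (s2 == base || alts.contains s2) then true
    else pvALoop s1 s2 rest

def are_skill_variants_py (skill1 : String) (skill2 : String) : Bool :=
  pvALoop skill1 skill2 pvTable

-- ===== PORT B =====
-- B's index-building loop: for base, alts in variants.items(): index[base] = base; for alt in alts: index[alt] = base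
def pvBuild (d : PySem.Dict String String) : List (String × List String) → PySem.Dict String String
  | [] => d
  | (base, alts) :: rest =>
      pvBuild (alts.foldl (fun d a => d.insert a base) (d.insert base base)) rest

-- Source B's 'g1 is not None and g1 == g2'
def pvSameGroup : Option String → Option String → Bool
  | some g1, some g2 => g1 == g2
  | _, _ => false

def are_skill_variants_py_alt (skill1 : String) (skill2 : String) : Bool :=
  let idx := pvBuild PySem.Dict.empty pvTable
  pvSameGroup (idx.get? skill1) (idx.get? skill2)

-- ===== PRECONDITION & SPEC =====
def Spec_are_skill_variants_py (skill1 : String) (skill2 : String) (out : Bool) : Prop := out = are_skill_variants_py_alt skill1 skill2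
instance (skill1 : String) (skill2 : String) (out : Bool) : Decidable (Spec_are_skill_variants_py skill1 skill2 out) := by unfold Spec_are_skill_variants_py; infer_instance

-- ===== CLAIM (what is proved, stated in full; the proofs are below) =====
def Claim_equal_are_skill_variants_py : Prop := ∀ (skill1 : String) (skill2 : String), Dom_are_skill_variants_py skill1 skill2 → Spec_are_skill_variants_py skill1 skill2 (are_skill_variants_py skill1 skill2)

-- ===== LEMMAS AND PROOFS =====

-- "s belongs to the group p" — A's per-group membership test
def pvInG (s : String) (p : String × List String) : Bool := s == p.1 || p.2.contains s

-- the terms a group contributes to the reverse index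
def pvTerms (p : String × List String) : List String := p.1 :: p.2

lemma pvInG_iff_mem_terms (s : String) (p : String × List String) :
    pvInG s p = true ↔ s ∈ pvTerms p := by
  simp [pvInG, pvTerms]

-- the inner alts-loop of pvBuild, characterised
lemma pvFoldl_insert_get? (alts : List String) (d : PySem.Dict String String)
    (base s : String) :
    (alts.foldl (fun d a => d.insert a base) d).get? s =
      if alts.contains s then some base else d.get? s := by
  induction alts generalizing d with
  | nil => simp
  | cons a rest ih =>
      simp only [List.foldl_cons, ih, List.contains_cons, PySem.Dict.get?_insert]
      by_cases h : s = a <;> by_cases hr : rest.contains s <;> simp_all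

-- looking up s in the index built over T yields the base of the first (by distinctness of
-- all terms: the only) group whose terms contain s, else falls through to the start dict
lemma pvBuild_get? (T : List (String × List String)) (d : PySem.Dict String String)
    (s : String) (hnd : (T.flatMap pvTerms).Nodup) :
    (pvBuild d T).get? s =
      match T.find? (pvInG s) with
      | some p => some p.1
      | none => d.get? s := by
  induction T generalizing d with
  | nil => rfl
  | cons p rest ih =>
      obtain ⟨base, alts⟩ := p
      have hnd' : ((base :: alts) ++ rest.flatMap pvTerms).Nodup := by
        simpa [pvTerms, List.flatMap_cons] using hnd
      have hrest : (rest.flatMap pvTerms).Nodup := hnd'.of_append_right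
      have hdisj : (base :: alts).Disjoint (rest.flatMap pvTerms) :=
        List.disjoint_of_nodup_append hnd'
      have hstep : ∀ (d : PySem.Dict String String),
          ((alts.foldl (fun d a => d.insert a base) (d.insert base base)).get? s) =
            if pvInG s (base, alts) then some base else d.get? s := by
        intro d
        rw [pvFoldl_insert_get?]
        simp only [PySem.Dict.get?_insert, pvInG]
        by_cases hb : s = base <;> by_cases ha : alts.contains s <;> simp_all
      show (pvBuild _ rest).get? s = _
      rw [ih _ hrest]
      by_cases hg : pvInG s (base, alts) = true
      · have hs : s ∈ (base :: alts) := by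
          simpa [pvTerms] using (pvInG_iff_mem_terms s (base, alts)).mp hg
        have hnone : rest.find? (pvInG s) = none := by
          rw [List.find?_eq_none]
          intro q hq hgq
          exact hdisj hs (List.mem_flatMap.mpr ⟨q, hq, (pvInG_iff_mem_terms s q).mp hgq⟩)
        simp [hnone, hg, hstep]
      · have hg' : pvInG s (base, alts) = false := by simpa using hg
        cases hf : rest.find? (pvInG s) with
        | none => simp [hg', hf, hstep]
        | some q => simp [hg', hf]

-- A's scan, characterised through the same first-group-containing-s function
lemma pvALoop_eq (s1 s2 : String) (T : List (String × List String))
    (hnd : (T.flatMap pvTerms).Nodup) :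
    pvALoop s1 s2 T =
      pvSameGroup ((T.find? (pvInG s1)).map (·.1)) ((T.find? (pvInG s2)).map (·.1)) := by
  induction T with
  | nil => rfl
  | cons p rest ih =>
      obtain ⟨base, alts⟩ := p
      have hnd' : ((base :: alts) ++ rest.flatMap pvTerms).Nodup := by
        simpa [pvTerms, List.flatMap_cons] using hnd
      have hrest : (rest.flatMap pvTerms).Nodup := hnd'.of_append_right
      have hdisj : (base :: alts).Disjoint (rest.flatMap pvTerms) :=
        List.disjoint_of_nodup_append hnd'
      have hnone : ∀ s, s ∈ (base :: alts) → rest.find? (pvInG s) = none := by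
        intro s hs
        rw [List.find?_eq_none]
        intro q hq hgq
        exact hdisj hs (List.mem_flatMap.mpr ⟨q, hq, (pvInG_iff_mem_terms s q).mp hgq⟩)
      have hbase : ∀ q, q ∈ rest → base ≠ q.1 := by
        intro q hq he
        exact hdisj (List.mem_cons_self)
          (List.mem_flatMap.mpr ⟨q, hq, by simp [pvTerms, he]⟩)
      have hA : pvALoop s1 s2 ((base, alts) :: rest) =
          if pvInG s1 (base, alts) && pvInG s2 (base, alts) then true
          else pvALoop s1 s2 rest := rfl
      rw [hA, ih hrest]
      by_cases h1 : pvInG s1 (base, alts) = true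
      · have hm1 : s1 ∈ (base :: alts) := by
          simpa [pvTerms] using (pvInG_iff_mem_terms s1 (base, alts)).mp h1
        by_cases h2 : pvInG s2 (base, alts) = true
        · simp [h1, h2, pvSameGroup]
        · have h2' : pvInG s2 (base, alts) = false := by simpa using h2
          rw [hnone s1 hm1]
          simp only [h1, h2', Bool.true_and, Bool.false_eq_true, if_false,
            List.find?_cons, Option.map_none]
          cases hf : rest.find? (pvInG s2) with
          | none => simp [pvSameGroup]
          | some q =>
              have hq : q ∈ rest := List.mem_of_find?_eq_some hf
              simp [pvSameGroup, hbase q hq]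
      · have h1' : pvInG s1 (base, alts) = false := by simpa using h1
        by_cases h2 : pvInG s2 (base, alts) = true
        · have hm2 : s2 ∈ (base :: alts) := by
            simpa [pvTerms] using (pvInG_iff_mem_terms s2 (base, alts)).mp h2
          rw [hnone s2 hm2]
          simp only [h1', h2, Bool.false_and, Bool.false_eq_true, if_false,
            List.find?_cons, Option.map_none]
          cases hf : rest.find? (pvInG s1) with
          | none => simp [pvSameGroup]
          | some q =>
              have hq : q ∈ rest := List.mem_of_find?_eq_some hf
              simp [pvSameGroup, (hbase q hq).symm]
        · have h2' : pvInG s2 (base, alts) = false := by simpa using h2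
          simp [h1', h2']

-- all 31 terms of the literal table are distinct
lemma pvTable_nodup : (pvTable.flatMap pvTerms).Nodup := by decide

-- ===== VERDICT (by name: the statement is the Claim_ definition above) =====
theorem are_skill_variants_py_spec : Claim_equal_are_skill_variants_py := by
  intro s1 s2 _
  unfold Spec_are_skill_variants_py are_skill_variants_py
  show pvALoop s1 s2 pvTable =
    pvSameGroup ((pvBuild PySem.Dict.empty pvTable).get? s1)
      ((pvBuild PySem.Dict.empty pvTable).get? s2)
  rw [pvALoop_eq s1 s2 pvTable pvTable_nodup,
      pvBuild_get? pvTable PySem.Dict.empty s1 pvTable_nodup,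
      pvBuild_get? pvTable PySem.Dict.empty s2 pvTable_nodup]
  cases h1 : pvTable.find? (pvInG s1) <;> cases h2 : pvTable.find? (pvInG s2) <;>
    simp [pvSameGroup, PySem.Dict.get?_empty]
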